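-- pv_equiv track=rewrite | github.com/AurelC2G/practice | googlecodejam/2020/1C/OverexcitedFan/code.py | solve
-- ===== SOURCE A (Python) =====
-- def solve(X, Y, M):
--     if X == 0 and Y == 0:
--         return 0
--
--     i = 0
--     for c in M:
--         i += 1
--         if c == 'N':
--             Y += 1
--         elif c == 'S':
--             Y -= 1
--         elif c == 'E':
--             X += 1
--         elif c == 'W':
--             X -= 1
--
--         if abs(X) + abs(Y) <= i:
--             return i
-- ===== SOURCE B (Python) =====
-- def solve(X, Y, M):
--     # Build the prefix positions (start included at index 0), then BINARY SEARCH for the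
--     # first index i with |x_i| + |y_i| <= i.  This is correct because each move changes
--     # the Manhattan distance by at most 1 while i grows by 1, so dist_i - i is
--     # non-increasing and the predicate is monotone in i.
--     DX = {'E': 1, 'W': -1}
--     DY = {'N': 1, 'S': -1}
--     xs = [X]
--     ys = [Y]
--     for c in M:
--         xs.append(xs[-1] + DX.get(c, 0))
--         ys.append(ys[-1] + DY.get(c, 0))
--     ok = lambda i: abs(xs[i]) + abs(ys[i]) <= i
--     lo, hi = 0, len(xs)
--     while lo < hi:
--         mid = (lo + hi) // 2
--         if ok(mid):
--             hi = mid
--         else: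
--             lo = mid + 1
--     return lo if lo < len(xs) else None
-- ===== Notes on version B (the rewrite author's own statement) =====
-- stated objective: alternative
-- what changed: B precomputes the list of prefix positions and then binary-searches for the first index i with |x_i|+|y_i| <= i (valid because each move changes the Manhattan distance by at most 1, so dist_i - i is non-increasing), replacing A's linear scan with early return.
import Mathlib
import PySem

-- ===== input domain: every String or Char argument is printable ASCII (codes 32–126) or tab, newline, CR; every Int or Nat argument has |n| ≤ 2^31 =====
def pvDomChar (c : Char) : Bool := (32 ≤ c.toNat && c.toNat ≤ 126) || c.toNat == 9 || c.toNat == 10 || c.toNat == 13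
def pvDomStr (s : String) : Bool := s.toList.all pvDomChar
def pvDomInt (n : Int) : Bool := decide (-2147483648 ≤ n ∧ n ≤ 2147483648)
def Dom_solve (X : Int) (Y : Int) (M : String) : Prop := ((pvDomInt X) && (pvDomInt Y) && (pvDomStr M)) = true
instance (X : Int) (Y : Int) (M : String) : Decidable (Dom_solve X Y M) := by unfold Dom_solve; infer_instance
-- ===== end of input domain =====

-- B precomputes the prefix positions and binary-searches for the first index i with
-- |x_i|+|y_i| ≤ i (the predicate is monotone since each move changes the distance by ≤ 1);
-- an alternative algorithm, not claimed faster (the prefix build is O(n) anyway).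


-- ===== PORT A =====
-- the for-loop of A: counter i, mutated X Y, early return on |X|+|Y| ≤ i, fall-through → none
def solveGo : List Char → Int → Int → Int → Option Int
  | [], _, _, _ => none
  | c :: cs, X, Y, i =>
    let i' := i + 1
    let XY :=
      if c = 'N' then (X, Y + 1)
      else if c = 'S' then (X, Y - 1)
      else if c = 'E' then (X + 1, Y)
      else if c = 'W' then (X - 1, Y)
      else (X, Y)
    if |XY.1| + |XY.2| ≤ i' then some i' else solveGo cs XY.1 XY.2 i'

def solve (X : Int) (Y : Int) (M : String) : Option Int :=
  if X = 0 ∧ Y = 0 then some 0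
  else solveGo M.toList X Y 0

-- ===== PORT B =====
-- DX.get(c,0) / DY.get(c,0) of Source B
def bDX (c : Char) : Int := if c = 'E' then 1 else if c = 'W' then -1 else 0
def bDY (c : Char) : Int := if c = 'N' then 1 else if c = 'S' then -1 else 0

-- the xs/ys prefix-position build of Source B (start position at index 0)
def bposAux : Int → Int → List Char → List (Int × Int)
  | X, Y, [] => [(X, Y)]
  | X, Y, c :: cs => (X, Y) :: bposAux (X + bDX c) (Y + bDY c) cs

-- ok = lambda i: abs(xs[i]) + abs(ys[i]) <= i  (every evaluated index is in range; getD default is never hit at call sites)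
def bOk (ps : List (Int × Int)) (i : Nat) : Bool :=
  decide (|(ps.getD i (0, 0)).1| + |(ps.getD i (0, 0)).2| ≤ (i : Int))

-- the while-loop of Source B; the fuel (= initial hi - lo) only makes the same loop total:
-- each iteration shrinks the interval, so fuel never runs out at a call site
def bsearchFuel (ps : List (Int × Int)) : Nat → Nat → Nat → Nat
  | 0, lo, _ => lo
  | fuel + 1, lo, hi =>
    if lo < hi then
      let mid := (lo + hi) / 2
      if bOk ps mid then bsearchFuel ps fuel lo mid else bsearchFuel ps fuel (mid + 1) hi
    else lo

def bsearch (ps : List (Int × Int)) (lo hi : Nat) : Nat := bsearchFuel ps (hi - lo) lo hi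

def solve_alt (X : Int) (Y : Int) (M : String) : Option Int :=
  let ps := bposAux X Y M.toList
  let lo := bsearch ps 0 ps.length
  if lo < ps.length then some (lo : Int) else none

-- ===== PRECONDITION & SPEC =====
def Spec_solve (X : Int) (Y : Int) (M : String) (out : Option Int) : Prop := out = solve_alt X Y M
instance (X : Int) (Y : Int) (M : String) (out : Option Int) : Decidable (Spec_solve X Y M out) := by unfold Spec_solve; infer_instance

-- ===== CLAIM (what is proved, stated in full; the proofs are below) =====
def Claim_equal_solve : Prop := ∀ (X : Int) (Y : Int) (M : String), Dom_solve X Y M → Spec_solve X Y M (solve X Y M)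

-- ===== LEMMAS AND PROOFS =====

-- proof-side linear scanner: first index i with |p.1|+|p.2| ≤ i over a suffix starting at index i
def scan : List (Int × Int) → Nat → Option Int
  | [], _ => none
  | p :: ps, i => if |p.1| + |p.2| ≤ (i : Int) then some (i : Int) else scan ps (i + 1)

lemma scan_bpos (cs : List Char) : ∀ (X Y : Int) (i : Nat),
    scan (bposAux X Y cs) i =
      if |X| + |Y| ≤ (i : Int) then some (i : Int) else solveGo cs X Y (i : Int) := by
  induction cs with
  | nil => intro X Y i; simp [bposAux, scan, solveGo]
  | cons c cs ih =>
    intro X Y i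
    show (if |X| + |Y| ≤ (i : Int) then some (i : Int)
          else scan (bposAux (X + bDX c) (Y + bDY c) cs) (i + 1)) = _
    rw [ih]
    rcases le_or_gt (|X| + |Y|) (i : Int) with h | h
    · simp [h]
    · have hstep :
        (if c = 'N' then (X, Y + 1)
         else if c = 'S' then (X, Y - 1)
         else if c = 'E' then (X + 1, Y)
         else if c = 'W' then (X - 1, Y)
         else (X, Y)) = (X + bDX c, Y + bDY c) := by
        simp only [bDX, bDY]
        split_ifs <;> simp_all <;> omega
      have hcast : ((i + 1 : Nat) : Int) = (i : Int) + 1 := by push_cast; ring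
      simp [not_le.mpr h, solveGo, hstep, hcast]

lemma bpos_adj (cs : List Char) : ∀ (X Y : Int) (i : Nat), i + 1 < (bposAux X Y cs).length →
    ∃ c, (bposAux X Y cs).getD (i + 1) (0, 0) =
      (((bposAux X Y cs).getD i (0, 0)).1 + bDX c, ((bposAux X Y cs).getD i (0, 0)).2 + bDY c) := by
  induction cs with
  | nil => intro X Y i h; simp [bposAux] at h
  | cons c cs ih =>
    intro X Y i h
    cases i with
    | zero =>
      refine ⟨c, ?_⟩
      have hhead : ∀ (X' Y' : Int), (bposAux X' Y' cs).getD 0 (0, 0) = (X', Y') := by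
        intro X' Y'; cases cs <;> simp [bposAux, List.getD]
      simp [bposAux, List.getD] at hhead ⊢
      simp [hhead]
    | succ j =>
      simp only [bposAux, List.length_cons] at h ⊢
      simpa using ih (X + bDX c) (Y + bDY c) j (by omega)

lemma bD_bound (c : Char) : |bDX c| + |bDY c| ≤ 1 := by
  simp only [bDX, bDY]; split_ifs <;> simp_all

lemma bOk_mono {X Y : Int} {cs : List Char} {i : Nat}
    (h : bOk (bposAux X Y cs) i = true) : bOk (bposAux X Y cs) (i + 1) = true := by
  by_cases hlt : i + 1 < (bposAux X Y cs).length
  · obtain ⟨c, hc⟩ := bpos_adj cs X Y i hlt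
    simp only [bOk, decide_eq_true_eq] at h ⊢
    rw [hc]
    have h1 := abs_add_le ((bposAux X Y cs).getD i (0, 0)).1 (bDX c)
    have h2 := abs_add_le ((bposAux X Y cs).getD i (0, 0)).2 (bDY c)
    have h3 := bD_bound c
    have hcast : ((i + 1 : Nat) : Int) = (i : Int) + 1 := by push_cast; ring
    rw [hcast]
    linarith [h1, h2, h3, h]
  · have hnone : (bposAux X Y cs)[i + 1]? = none := List.getElem?_eq_none (by omega)
    simp only [bOk, List.getD, hnone, Option.getD_none, decide_eq_true_eq]
    have : (0 : Int) ≤ (i : Int) := by positivity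
    simp only [abs_zero, add_zero]
    push_cast
    linarith

lemma bOk_ge {X Y : Int} {cs : List Char} {l : Nat} (hl : bOk (bposAux X Y cs) l = true) :
    ∀ j, l ≤ j → bOk (bposAux X Y cs) j = true := by
  intro j hj
  induction j, hj using Nat.le_induction with
  | base => exact hl
  | succ j hj ih => exact bOk_mono ih

lemma bOk_len (X Y : Int) (cs : List Char) :
    bOk (bposAux X Y cs) (bposAux X Y cs).length = true := by
  have hnone : (bposAux X Y cs)[(bposAux X Y cs).length]? = none := List.getElem?_eq_none (by omega)
  simp only [bOk, List.getD, hnone, Option.getD_none, decide_eq_true_eq]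
  simp only [abs_zero, add_zero]
  positivity

lemma bsearchFuel_eq (X Y : Int) (cs : List Char) (l : Nat)
    (hl : bOk (bposAux X Y cs) l = true)
    (hmin : ∀ j, j < l → bOk (bposAux X Y cs) j = false) :
    ∀ n lo hi, hi - lo ≤ n → lo ≤ l → l ≤ hi → bsearchFuel (bposAux X Y cs) n lo hi = l := by
  intro n
  induction n with
  | zero =>
    intro lo hi hn h1 h2
    simp only [bsearchFuel]
    omega
  | succ n ih =>
    intro lo hi hn h1 h2
    simp only [bsearchFuel]
    by_cases hlt : lo < hi
    · simp only [hlt, if_true]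
      by_cases hok : bOk (bposAux X Y cs) ((lo + hi) / 2) = true
      · have hle : l ≤ (lo + hi) / 2 := by
          by_contra hc
          have hmid : (lo + hi) / 2 < l := by omega
          have hf := hmin ((lo + hi) / 2) hmid
          rw [hf] at hok
          exact absurd hok (by simp)
        simp only [hok, if_true]
        exact ih lo ((lo + hi) / 2) (by omega) h1 hle
      · have hgt : (lo + hi) / 2 < l := by
          by_contra hc
          exact hok (bOk_ge hl _ (by omega))
        simp only [hok, Bool.false_eq_true, if_false]
        exact ih ((lo + hi) / 2 + 1) hi (by omega) (by omega) h2
    · simp only [hlt, if_false]; omega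

lemma bsearch_eq (X Y : Int) (cs : List Char) (l : Nat)
    (hl : bOk (bposAux X Y cs) l = true)
    (hmin : ∀ j, j < l → bOk (bposAux X Y cs) j = false)
    (lo hi : Nat) (h1 : lo ≤ l) (h2 : l ≤ hi) :
    bsearch (bposAux X Y cs) lo hi = l :=
  bsearchFuel_eq X Y cs l hl hmin (hi - lo) lo hi (by omega) h1 h2

lemma scan_drop (X Y : Int) (cs : List Char) (l : Nat)
    (hl : bOk (bposAux X Y cs) l = true)
    (hmin : ∀ j, j < l → bOk (bposAux X Y cs) j = false)
    (hlen : l ≤ (bposAux X Y cs).length) :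
    ∀ n i, l - i ≤ n → i ≤ l →
      scan ((bposAux X Y cs).drop i) i =
        if l < (bposAux X Y cs).length then some (l : Int) else none := by
  set ps := bposAux X Y cs with hps
  intro n
  induction n with
  | zero =>
    intro i hn hi
    have hil : i = l := by omega
    subst hil
    by_cases h : i < ps.length
    · have hdrop : ps[i] :: ps.drop (i + 1) = ps.drop i := List.getElem_cons_drop h
      have hget : ps.getD i (0, 0) = ps[i] := List.getD_eq_getElem ps (0, 0) h
      rw [← hdrop]
      simp only [bOk, hget, decide_eq_true_eq] at hl
      simp [scan, hl, h]
    · have : ps.drop i = [] := List.drop_eq_nil_of_le (by omega)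
      simp [this, scan, h]
  | succ n ih =>
    intro i hn hi
    by_cases hil : i = l
    · exact ih i (by omega) hi
    · have hiltl : i < l := by omega
      have h : i < ps.length := by omega
      have hdrop : ps[i] :: ps.drop (i + 1) = ps.drop i := List.getElem_cons_drop h
      have hget : ps.getD i (0, 0) = ps[i] := List.getD_eq_getElem ps (0, 0) h
      have hfalse := hmin i hiltl
      simp only [bOk, hget, decide_eq_false_iff_not] at hfalse
      rw [← hdrop]
      simp only [scan, hfalse, if_false]
      exact ih (i + 1) (by omega) (by omega)

lemma abs_add_nonpos_iff (X Y : Int) : |X| + |Y| ≤ 0 ↔ X = 0 ∧ Y = 0 := by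
  constructor
  · intro h
    have hx := abs_nonneg X; have hy := abs_nonneg Y
    constructor <;> [exact abs_eq_zero.mp (le_antisymm (by linarith) hx);
                     exact abs_eq_zero.mp (le_antisymm (by linarith) hy)]
  · rintro ⟨rfl, rfl⟩; simp

-- ===== VERDICT (by name: the statement is the Claim_ definition above) =====
theorem solve_spec : Claim_equal_solve := by
  intro X Y M _
  show solve X Y M = solve_alt X Y M
  set cs := M.toList with hcs
  set ps := bposAux X Y cs with hps
  -- the least index l with bOk ps l (exists since bOk holds at ps.length)
  have hex : ∃ j, bOk ps j = true := ⟨ps.length, bOk_len X Y cs⟩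
  set l := Nat.find hex with hldef
  have hl : bOk ps l = true := Nat.find_spec hex
  have hmin : ∀ j, j < l → bOk ps j = false := by
    intro j hj
    simpa using Nat.find_min hex hj
  have hlen : l ≤ ps.length := Nat.find_min' hex (bOk_len X Y cs)
  -- B's side: the binary search lands on l
  have hbs : bsearch ps 0 ps.length = l :=
    bsearch_eq X Y cs l hl hmin 0 ps.length (by omega) hlen
  have hB : solve_alt X Y M = if l < ps.length then some (l : Int) else none := by
    have hdef : solve_alt X Y M =
        if bsearch ps 0 ps.length < ps.length then some ((bsearch ps 0 ps.length : Nat) : Int)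
        else none := rfl
    rw [hdef, hbs]
  -- A's side: the linear scan also lands on l
  have hA : solve X Y M = if l < ps.length then some (l : Int) else none := by
    have hscan := scan_drop X Y cs l hl hmin hlen l 0 (by omega) (by omega)
    simp only [List.drop_zero, ← hps] at hscan
    rw [← hscan, hps, scan_bpos, solve, ← hcs]
    simp only [Nat.cast_zero]
    by_cases h : X = 0 ∧ Y = 0
    · rw [if_pos h, if_pos (by exact_mod_cast (abs_add_nonpos_iff X Y).mpr h)]
    · rw [if_neg h, if_neg (fun hle => h ((abs_add_nonpos_iff X Y).mp (by exact_mod_cast hle)))]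
  rw [hA, hB]
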